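-- pv_equiv track=rewrite | github.com/hardith/Identifier-Name-TreeSitter-Linter | identifier_violation_helper.py | check_long_identifier_name
-- ===== SOURCE A (Python) =====
-- def check_long_identifier_name(identifier_name):
--     index_list = [x for x,y in enumerate(list(identifier_name)) if(y.isupper())]
--
--     if len(index_list) > 0 and index_list[0] != 0:
--         index_list = [0] + index_list
--
--     camel_=[]
--
--     for i in range(len(index_list)):
--         try:
--             camel_.append(identifier_name[index_list[i]:index_list[i+1]])
--         except:
--             camel_.append(identifier_name[index_list[i]:])
--
--     return any(len(i)>=10 for i in camel_)
-- ===== SOURCE B (Python) =====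
-- def check_long_identifier_name(identifier_name):
--     # An identifier with no uppercase letter is never split, and the linter
--     # only flags camelCase segments, so it reports no violation.
--     if not any(c.isupper() for c in identifier_name):
--         return False
--     # One pass: length of the current camelCase segment; a new segment starts
--     # at every uppercase letter (except one at position 0).
--     seg = 0
--     for c in identifier_name:
--         if c.isupper() and seg > 0:
--             if seg >= 10:
--                 return True
--             seg = 0
--         seg += 1
--     return seg >= 10
-- ===== Notes on version B (the rewrite author's own statement) =====
-- stated objective: faster
-- what changed: Replaces the enumerate-built index list, the conditional index prepend and the list of sliced segment substrings with a single pass that maintains only the current camelCase-segment length (plus an uppercase-existence guard), returning early once a finished segment reaches length 10.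
import Mathlib
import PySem

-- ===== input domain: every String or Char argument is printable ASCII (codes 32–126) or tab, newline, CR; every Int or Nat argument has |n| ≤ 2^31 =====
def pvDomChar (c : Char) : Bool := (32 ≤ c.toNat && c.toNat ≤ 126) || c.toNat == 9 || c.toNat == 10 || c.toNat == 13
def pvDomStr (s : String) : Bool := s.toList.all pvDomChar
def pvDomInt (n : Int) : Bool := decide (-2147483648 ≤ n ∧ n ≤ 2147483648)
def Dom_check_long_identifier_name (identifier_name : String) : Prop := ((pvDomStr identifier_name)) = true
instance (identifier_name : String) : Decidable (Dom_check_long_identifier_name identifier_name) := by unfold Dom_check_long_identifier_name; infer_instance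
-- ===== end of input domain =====

-- B replaces A's index list and list of sliced segments by a single pass keeping
-- only the current camelCase-segment length (measured constant-factor faster).

-- ===== PORT A =====
def check_long_identifier_name (identifier_name : String) : Bool :=
  let cs := identifier_name.toList
  let index_list : List Int :=
    ((PySem.List.enumerate cs).filter (fun p => PySem.Chars.isupper p.2)).map (fun p => p.1)
  let index_list :=
    if 0 < index_list.length ∧ index_list.getD 0 0 ≠ 0 then (0 : Int) :: index_list
    else index_list
  let camel_ : List (List Char) :=
    (PySem.List.pyRange 0 (index_list.length : Int) 1).foldl
      (fun acc i =>
        acc ++ [(match PySem.List.pyGet? index_list (i + 1) with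
                 | some b => PySem.List.slice cs (some (PySem.List.pyGetD index_list i 0)) (some b)
                 | none   => PySem.List.slice cs (some (PySem.List.pyGetD index_list i 0)) none)])
      []
  camel_.any (fun i => decide (10 ≤ i.length))

-- ===== PORT B =====
-- the for-loop of Source B with its early return: seg is the current segment length
def pvAltLoop : List Char → Nat → Bool
  | [], seg => decide (10 ≤ seg)
  | c :: rest, seg =>
    if PySem.Chars.isupper c ∧ 0 < seg then
      if 10 ≤ seg then true else pvAltLoop rest 1
    else pvAltLoop rest (seg + 1)

def check_long_identifier_name_alt (identifier_name : String) : Bool :=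
  if ¬ identifier_name.toList.any (fun c => PySem.Chars.isupper c) then false
  else pvAltLoop identifier_name.toList 0

-- ===== PRECONDITION & SPEC =====
def Spec_check_long_identifier_name (identifier_name : String) (out : Bool) : Prop := out = check_long_identifier_name_alt identifier_name
instance (identifier_name : String) (out : Bool) : Decidable (Spec_check_long_identifier_name identifier_name out) := by unfold Spec_check_long_identifier_name; infer_instance

-- ===== CLAIM (what is proved, stated in full; the proofs are below) =====
def Claim_equal_check_long_identifier_name : Prop := ∀ (identifier_name : String), Dom_check_long_identifier_name identifier_name → Spec_check_long_identifier_name identifier_name (check_long_identifier_name identifier_name)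

-- ===== LEMMAS AND PROOFS =====

-- positions (0-based) of the uppercase characters of a list
def upN : List Char → List Nat
  | [] => []
  | c :: t => if PySem.Chars.isupper c then 0 :: (upN t).map (· + 1) else (upN t).map (· + 1)

-- "some gap ≥ 10": boundaries a :: bs, final boundary n
def anyGapN : Nat → List Nat → Nat → Bool
  | a, [], n => decide (10 ≤ n - a)
  | a, b :: bs, n => decide (10 ≤ b - a) || anyGapN b bs n

-- B's loop with the guard unfolded once (seg ≥ 1 from here on)
def anyGapFrom : Nat → List Char → Bool
  | seg, [] => decide (10 ≤ seg)
  | seg, c :: t =>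
    if PySem.Chars.isupper c then decide (10 ≤ seg) || anyGapFrom 1 t
    else anyGapFrom (seg + 1) t

theorem enum_filter_eq_upN (cs : List Char) : ∀ (s : Int),
    ((PySem.List.enumerate cs s).filter (fun p => PySem.Chars.isupper p.2)).map (fun p => p.1)
      = (upN cs).map (fun k : Nat => s + (k : Int)) := by
  induction cs with
  | nil => intro s; simp [PySem.List.enumerate_nil, upN]
  | cons c t ih =>
    intro s
    by_cases h : PySem.Chars.isupper c <;>
        simp [PySem.List.enumerate_cons, upN, h, ih (s + 1), List.map_map, Function.comp_def] <;>
      · intro a _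
        omega

theorem upN_lt (cs : List Char) : ∀ k ∈ upN cs, k < cs.length := by
  induction cs with
  | nil => simp [upN]
  | cons c t ih =>
    intro k hk
    simp only [List.length_cons]
    by_cases h : PySem.Chars.isupper c <;> simp only [upN, h, if_pos, if_neg, List.mem_cons,
      List.mem_map, Bool.false_eq_true, not_false_eq_true] at hk
    · rcases hk with rfl | ⟨m, hm, rfl⟩
      · omega
      · have := ih m hm; omega
    · rcases hk with ⟨m, hm, rfl⟩
      have := ih m hm; omega

theorem upN_nil_iff (cs : List Char) :
    upN cs = [] ↔ cs.any (fun c => PySem.Chars.isupper c) = false := by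
  induction cs with
  | nil => simp [upN]
  | cons c t ih =>
    by_cases h : PySem.Chars.isupper c <;> simp [upN, h, ih]

theorem anyGapN_shift (bs : List Nat) : ∀ (a n d : Nat),
    anyGapN (a + d) (bs.map (· + d)) (n + d) = anyGapN a bs n := by
  induction bs with
  | nil => intro a n d; simp only [List.map_nil, anyGapN]; exact decide_eq_decide.mpr (by omega)
  | cons b bs ih =>
    intro a n d
    simp only [List.map_cons, anyGapN, ih]
    congr 1
    exact decide_eq_decide.mpr (by omega)

theorem anyGapFrom_eq (t : List Char) : ∀ (seg : Nat),
    anyGapFrom seg t = anyGapN 0 ((upN t).map (· + seg)) (t.length + seg) := by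
  induction t with
  | nil => intro seg; simp [anyGapFrom, upN, anyGapN]
  | cons c t ih =>
    intro seg
    by_cases h : PySem.Chars.isupper c
    · have hup : upN (c :: t) = 0 :: (upN t).map (· + 1) := by simp [upN, h]
      rw [hup]
      rw [show anyGapFrom seg (c :: t) = (decide (10 ≤ seg) || anyGapFrom 1 t) from by
        simp [anyGapFrom, h]]
      rw [ih 1]
      simp only [List.map_cons, List.length_cons, anyGapN, Nat.zero_add, Nat.sub_zero]
      have hshift := anyGapN_shift ((upN t).map (· + 1)) 0 (t.length + 1) seg
      rw [Nat.zero_add] at hshift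
      rw [hshift]
    · have hup : upN (c :: t) = (upN t).map (· + 1) := by simp [upN, h]
      rw [hup]
      rw [show anyGapFrom seg (c :: t) = anyGapFrom (seg + 1) t from by simp [anyGapFrom, h]]
      rw [ih (seg + 1)]
      have hf : ((upN t).map (· + 1)).map (· + seg) = (upN t).map (· + (seg + 1)) := by
        rw [List.map_map]
        apply List.map_congr_left; intro x _; simp only [Function.comp_apply]; omega
      rw [hf, List.length_cons, show t.length + 1 + seg = t.length + (seg + 1) from by omega]

theorem pvAltLoop_eq_anyGapFrom (t : List Char) : ∀ (seg : Nat), 1 ≤ seg →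
    pvAltLoop t seg = anyGapFrom seg t := by
  induction t with
  | nil => intro seg _; rfl
  | cons c t ih =>
    intro seg hseg
    by_cases h : PySem.Chars.isupper c
    · simp only [pvAltLoop, anyGapFrom, h, true_and, if_pos, (by omega : 0 < seg)]
      by_cases h10 : 10 ≤ seg
      · simp [h10]
      · simp [h10, ih 1 (by omega)]
    · simp [pvAltLoop, anyGapFrom, h, ih (seg + 1) (by omega)]

theorem getD_map_intCast (l : List Nat) : ∀ (k : Nat),
    (l.map (fun x : Nat => (x : Int))).getD k 0 = ((l.getD k 0 : Nat) : Int) := by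
  induction l with
  | nil => intro k; simp
  | cons x l ih =>
    intro k
    cases k with
    | zero => simp
    | succ n => simp only [List.map_cons, List.getD_cons_succ]; exact ih n

-- one iteration of A's camel_ loop, rewritten over Nat indices
theorem camel_body_natform (l : List Nat) (cs : List Char) (k : Nat) :
    (match PySem.List.pyGet? (l.map (fun k : Nat => (k : Int))) ((k : Int) + 1) with
     | some b => PySem.List.slice cs (some (PySem.List.pyGetD (l.map (fun k : Nat => (k : Int))) (k : Int) 0)) (some b)
     | none   => PySem.List.slice cs (some (PySem.List.pyGetD (l.map (fun k : Nat => (k : Int))) (k : Int) 0)) none)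
    = (match l[k+1]? with
       | some b => (cs.drop (l.getD k 0)).take (b - l.getD k 0)
       | none   => cs.drop (l.getD k 0)) := by
  have h1 : ((k : Int) + 1) = (((k + 1 : Nat) : Nat) : Int) := by push_cast; ring
  rw [h1, PySem.List.pyGet?_natCast, PySem.List.pyGetD_natCast, getD_map_intCast,
    List.getElem?_map]
  cases l[k+1]? with
  | none => simp [PySem.List.slice_from_natCast]
  | some b => simp [PySem.List.slice_natCast]

-- the index loop over (a :: bs), in Nat form, equals anyGapN
theorem natAny_eq_anyGapN (bs : List Nat) : ∀ (a : Nat) (cs : List Char),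
    (∀ b ∈ bs, b ≤ cs.length) →
    ((List.range (bs.length + 1)).any (fun k =>
      decide (10 ≤ (match (a :: bs)[k+1]? with
        | some b => ((cs.drop ((a :: bs).getD k 0)).take (b - (a :: bs).getD k 0)).length
        | none   => (cs.drop ((a :: bs).getD k 0)).length))))
    = anyGapN a bs cs.length := by
  induction bs with
  | nil =>
    intro a cs _
    simp [List.range_one, anyGapN]
  | cons b bs ih =>
    intro a cs hb
    simp only [List.length_cons]
    rw [List.range_succ_eq_map, List.any_cons, List.any_map]
    have hb0 : b ≤ cs.length := hb b (by simp)
    have h0 : (decide (10 ≤ (match (a :: b :: bs)[0+1]? with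
        | some x => ((cs.drop ((a :: b :: bs).getD 0 0)).take (x - (a :: b :: bs).getD 0 0)).length
        | none   => (cs.drop ((a :: b :: bs).getD 0 0)).length)))
        = decide (10 ≤ b - a) := by
      simp only [List.getElem?_cons_succ, List.getElem?_cons_zero, List.getD_cons_zero,
        List.length_take, List.length_drop]
      exact decide_eq_decide.mpr (by rw [Nat.min_def]; split_ifs <;> omega)
    rw [h0]
    congr 1
    have hfun : ((fun k => decide (10 ≤ (match (a :: b :: bs)[k+1]? with
        | some x => ((cs.drop ((a :: b :: bs).getD k 0)).take (x - (a :: b :: bs).getD k 0)).length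
        | none   => (cs.drop ((a :: b :: bs).getD k 0)).length))) ∘ Nat.succ)
        = (fun k => decide (10 ≤ (match (b :: bs)[k+1]? with
        | some x => ((cs.drop ((b :: bs).getD k 0)).take (x - (b :: bs).getD k 0)).length
        | none   => (cs.drop ((b :: bs).getD k 0)).length))) := by
      funext k
      simp only [Function.comp_apply, Nat.succ_eq_add_one, List.getElem?_cons_succ,
        List.getD_cons_succ]
      rfl
    rw [hfun]
    exact ih b cs (fun x hx => hb x (by simp [hx]))

-- the camel_ loop of A on boundary list (a :: bs).map cast equals anyGapN
theorem camel_fold_eq_anyGapN (bs : List Nat) (a : Nat) (cs : List Char)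
    (hb : ∀ b ∈ bs, b ≤ cs.length) :
    (((PySem.List.pyRange 0 ((((a :: bs).map (fun k : Nat => (k : Int))).length : Nat) : Int) 1).foldl
      (fun acc i =>
        acc ++ [(match PySem.List.pyGet? ((a :: bs).map (fun k : Nat => (k : Int))) (i + 1) with
                 | some b => PySem.List.slice cs (some (PySem.List.pyGetD ((a :: bs).map (fun k : Nat => (k : Int))) i 0)) (some b)
                 | none   => PySem.List.slice cs (some (PySem.List.pyGetD ((a :: bs).map (fun k : Nat => (k : Int))) i 0)) none)])
      []).any (fun i => decide (10 ≤ i.length)))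
    = anyGapN a bs cs.length := by
  rw [PySem.List.pyRange_zero_nat, PySem.List.foldl_append_singleton_eq_map, List.nil_append,
    List.any_map, List.any_map]
  rw [show ((a :: bs).map (fun k : Nat => (k : Int))).length = bs.length + 1 from by simp]
  rw [← natAny_eq_anyGapN bs a cs hb]
  congr 1
  funext k
  simp only [Function.comp_apply]
  rw [camel_body_natform]
  cases (a :: bs)[k+1]? <;> rfl

theorem check_long_identifier_name_eq (identifier_name : String) :
    check_long_identifier_name identifier_name = check_long_identifier_name_alt identifier_name := by
  have hidx := enum_filter_eq_upN identifier_name.toList 0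
  simp only [zero_add] at hidx
  rcases hcs : identifier_name.toList with _ | ⟨c, t⟩
  · rw [hcs] at hidx
    simp only [check_long_identifier_name, check_long_identifier_name_alt, hcs, hidx]
    decide
  · rw [hcs] at hidx
    simp only [check_long_identifier_name, check_long_identifier_name_alt, hcs, hidx]
    by_cases h : PySem.Chars.isupper c
    · -- first char uppercase: no 0 is prepended
      have hup : upN (c :: t) = 0 :: (upN t).map (· + 1) := by simp [upN, h]
      rw [hup]
      rw [if_neg (show ¬(0 < ((0 :: (upN t).map (· + 1)).map (fun k : Nat => (k : Int))).length ∧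
          ((0 :: (upN t).map (· + 1)).map (fun k : Nat => (k : Int))).getD 0 0 ≠ 0) from by simp)]
      rw [camel_fold_eq_anyGapN ((upN t).map (· + 1)) 0 (c :: t) (by
        intro b hb
        rcases List.mem_map.mp hb with ⟨x, hx, rfl⟩
        have := upN_lt t x hx
        simp only [List.length_cons]
        omega)]
      rw [if_neg (show ¬((c :: t).any (fun c => PySem.Chars.isupper c)) = true → False from by
        simp [List.any_cons, h])]
      rw [show pvAltLoop (c :: t) 0 = pvAltLoop t 1 from by simp [pvAltLoop],
        pvAltLoop_eq_anyGapFrom t 1 (by omega), anyGapFrom_eq t 1]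
      simp
    · rcases hupt : upN t with _ | ⟨x, xs⟩
      · -- no uppercase anywhere: both sides are false
        have hup : upN (c :: t) = [] := by simp [upN, h, hupt]
        rw [hup]
        have hany : t.any (fun c => PySem.Chars.isupper c) = false := (upN_nil_iff t).mp hupt
        simp [List.any_cons, h, hany]
      · -- uppercase exists but not at position 0: a 0 is prepended
        have hup : upN (c :: t) = (x + 1) :: xs.map (· + 1) := by simp [upN, h, hupt]
        rw [hup]
        rw [if_pos (show 0 < (((x + 1) :: xs.map (· + 1)).map (fun k : Nat => (k : Int))).length ∧
            (((x + 1) :: xs.map (· + 1)).map (fun k : Nat => (k : Int))).getD 0 0 ≠ 0 from by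
          refine ⟨by simp, ?_⟩
          simp
          omega)]
        rw [show ((0 : Int) :: ((x + 1) :: xs.map (· + 1)).map (fun k : Nat => (k : Int)))
            = ((0 :: (x + 1) :: xs.map (· + 1)).map (fun k : Nat => (k : Int))) from by simp]
        rw [camel_fold_eq_anyGapN ((x + 1) :: xs.map (· + 1)) 0 (c :: t) (by
          intro b hb
          have hb' : b ∈ upN (c :: t) := by rw [hup]; exact hb
          have := upN_lt (c :: t) b hb'
          omega)]
        have hanyt : t.any (fun c => PySem.Chars.isupper c) = true := by
          cases hv : t.any (fun c => PySem.Chars.isupper c)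
          · exact absurd ((upN_nil_iff t).mpr hv) (by simp [hupt])
          · rfl
        rw [if_neg (show ¬((c :: t).any (fun c => PySem.Chars.isupper c)) = true → False from by
          simp [List.any_cons, h, hanyt])]
        rw [show pvAltLoop (c :: t) 0 = pvAltLoop t 1 from by simp [pvAltLoop],
          pvAltLoop_eq_anyGapFrom t 1 (by omega), anyGapFrom_eq t 1]
        simp [hupt]

-- ===== VERDICT (by name: the statement is the Claim_ definition above) =====
theorem check_long_identifier_name_spec : Claim_equal_check_long_identifier_name := by
  intro s _
  unfold Spec_check_long_identifier_name
  exact check_long_identifier_name_eq s
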